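-- pv_equiv track=rewrite | github.com/theEMA-dev/microRISC | src/instruction_set.py | decode_instruction
-- ===== SOURCE A (Python) =====
-- OPCODES = {
--     "add": 0b0000,
--     "sub": 0b0001,
--     "and": 0b0010,
--     "or": 0b0011,
--     "slt": 0b0100,
--     "sll": 0b0101,
--     "srl": 0b0110,
--     "addi": 0b0111,
--     "lw": 0b1000,
--     "sw": 0b1001,
--     "beq": 0b1010,
--     "bne": 0b1011,
--     "j": 0b1100,
--     "jal": 0b1101,
--     "jr": 0b1110
-- }
--
-- def decode_instruction(encoded):
--     """Decodes a 16-bit binary string into a human-readable instruction and operands."""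
--     opcode = (encoded >> 12) & 0xF
--
--     # Find the operation
--     op = None
--     for key, value in OPCODES.items():
--         if value == opcode:
--             op = key
--             break
--
--     if op is None:
--         return "UNKNOWN", None
--
--     # Extract operands based on instruction type
--     if op in {"add", "sub", "and", "or", "slt"}:  # R-type
--         rs = (encoded >> 9) & 0x7
--         rt = (encoded >> 6) & 0x7
--         rd = (encoded >> 3) & 0x7
--         return op, [rd, rs, rt]
--     elif op in {"sll", "srl"}:  # R-type with shamt
--         rt = (encoded >> 6) & 0x7
--         rd = (encoded >> 3) & 0x7
--         shamt = encoded & 0x7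
--         return op, [rd, rt, shamt]
--     elif op in {"addi", "lw", "sw"}:  # I-type
--         rs = (encoded >> 9) & 0x7
--         rt = (encoded >> 6) & 0x7
--         imm = encoded & 0x3F
--         return op, [rt, rs, imm]
--     elif op in {"beq", "bne"}:  # Branch
--         rs = (encoded >> 9) & 0x7
--         rt = (encoded >> 6) & 0x7
--         offset = encoded & 0x3F
--         return op, [rs, rt, offset]
--     elif op in {"j", "jal"}:  # J-type
--         target = encoded & 0xFFF
--         return op, [target]
--     elif op == "jr":  # Jump register
--         rs = (encoded >> 9) & 0x7
--         return op, [rs]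
--     else:
--         return "UNKNOWN", None
-- ===== SOURCE B (Python) =====
-- # Table-driven decoder: opcode nibble -> (name, [(shift, mask), ...]) in output order.
-- TABLE = {
--     0b0000: ("add",  [(3, 0x7), (9, 0x7), (6, 0x7)]),
--     0b0001: ("sub",  [(3, 0x7), (9, 0x7), (6, 0x7)]),
--     0b0010: ("and",  [(3, 0x7), (9, 0x7), (6, 0x7)]),
--     0b0011: ("or",   [(3, 0x7), (9, 0x7), (6, 0x7)]),
--     0b0100: ("slt",  [(3, 0x7), (9, 0x7), (6, 0x7)]),
--     0b0101: ("sll",  [(3, 0x7), (6, 0x7), (0, 0x7)]),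
--     0b0110: ("srl",  [(3, 0x7), (6, 0x7), (0, 0x7)]),
--     0b0111: ("addi", [(6, 0x7), (9, 0x7), (0, 0x3F)]),
--     0b1000: ("lw",   [(6, 0x7), (9, 0x7), (0, 0x3F)]),
--     0b1001: ("sw",   [(6, 0x7), (9, 0x7), (0, 0x3F)]),
--     0b1010: ("beq",  [(9, 0x7), (6, 0x7), (0, 0x3F)]),
--     0b1011: ("bne",  [(9, 0x7), (6, 0x7), (0, 0x3F)]),
--     0b1100: ("j",    [(0, 0xFFF)]),
--     0b1101: ("jal",  [(0, 0xFFF)]),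
--     0b1110: ("jr",   [(9, 0x7)]),
-- }
--
-- def decode_instruction(encoded):
--     """Decodes a 16-bit binary string into a human-readable instruction and operands."""
--     entry = TABLE.get((encoded >> 12) & 0xF)
--     if entry is None:
--         return "UNKNOWN", None
--     op, fields = entry
--     return op, [(encoded >> s) & m for s, m in fields]
-- ===== Notes on version B (the rewrite author's own statement) =====
-- stated objective: idiomatic
-- what changed: Replaces the reverse linear scan of OPCODES plus a six-way if/elif branch chain by a single static table mapping the opcode nibble to its name and an ordered list of (shift, mask) operand descriptors, extracted with one comprehension.
import Mathlib
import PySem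

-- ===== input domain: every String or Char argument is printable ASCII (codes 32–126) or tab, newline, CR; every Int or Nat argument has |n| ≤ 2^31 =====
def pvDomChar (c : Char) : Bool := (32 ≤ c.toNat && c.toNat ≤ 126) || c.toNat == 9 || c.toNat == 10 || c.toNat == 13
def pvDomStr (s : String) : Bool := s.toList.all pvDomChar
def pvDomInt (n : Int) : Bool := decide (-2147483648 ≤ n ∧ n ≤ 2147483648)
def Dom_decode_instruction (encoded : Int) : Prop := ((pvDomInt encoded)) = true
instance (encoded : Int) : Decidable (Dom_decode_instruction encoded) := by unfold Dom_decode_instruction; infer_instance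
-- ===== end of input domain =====

-- B replaces A's reverse-scan of OPCODES plus a per-type if/elif chain by one static
-- table from opcode nibble to (name, operand (shift,mask) descriptors); objective: idiomatic.


-- ===== PORT A =====
def OPCODES : List (String × Int) :=
  [("add", 0), ("sub", 1), ("and", 2), ("or", 3), ("slt", 4), ("sll", 5), ("srl", 6),
   ("addi", 7), ("lw", 8), ("sw", 9), ("beq", 10), ("bne", 11), ("j", 12), ("jal", 13), ("jr", 14)]

-- the 'for key, value in OPCODES.items(): if value == opcode: op = key; break' loop
def findOp (opcode : Int) : List (String × Int) → Option String
  | [] => none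
  | (key, value) :: rest => if value = opcode then some key else findOp opcode rest

def decode_instruction (encoded : Int) : String × Option (List Int) :=
  let opcode := PySem.Int.band (encoded >>> 12) 0xF
  match findOp opcode OPCODES with
  | none => ("UNKNOWN", none)
  | some op =>
    if op = "add" ∨ op = "sub" ∨ op = "and" ∨ op = "or" ∨ op = "slt" then
      let rs := PySem.Int.band (encoded >>> 9) 0x7
      let rt := PySem.Int.band (encoded >>> 6) 0x7
      let rd := PySem.Int.band (encoded >>> 3) 0x7
      (op, some [rd, rs, rt])
    else if op = "sll" ∨ op = "srl" then
      let rt := PySem.Int.band (encoded >>> 6) 0x7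
      let rd := PySem.Int.band (encoded >>> 3) 0x7
      let shamt := PySem.Int.band encoded 0x7
      (op, some [rd, rt, shamt])
    else if op = "addi" ∨ op = "lw" ∨ op = "sw" then
      let rs := PySem.Int.band (encoded >>> 9) 0x7
      let rt := PySem.Int.band (encoded >>> 6) 0x7
      let imm := PySem.Int.band encoded 0x3F
      (op, some [rt, rs, imm])
    else if op = "beq" ∨ op = "bne" then
      let rs := PySem.Int.band (encoded >>> 9) 0x7
      let rt := PySem.Int.band (encoded >>> 6) 0x7
      let offset := PySem.Int.band encoded 0x3F
      (op, some [rs, rt, offset])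
    else if op = "j" ∨ op = "jal" then
      let target := PySem.Int.band encoded 0xFFF
      (op, some [target])
    else if op = "jr" then
      let rs := PySem.Int.band (encoded >>> 9) 0x7
      (op, some [rs])
    else
      ("UNKNOWN", none)

-- ===== PORT B =====
def TABLE : PySem.Dict Int (String × List (Nat × Int)) :=
  PySem.Dict.mk
  [(0, ("add",  [(3, 0x7), (9, 0x7), (6, 0x7)])),
   (1, ("sub",  [(3, 0x7), (9, 0x7), (6, 0x7)])),
   (2, ("and",  [(3, 0x7), (9, 0x7), (6, 0x7)])),
   (3, ("or",   [(3, 0x7), (9, 0x7), (6, 0x7)])),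
   (4, ("slt",  [(3, 0x7), (9, 0x7), (6, 0x7)])),
   (5, ("sll",  [(3, 0x7), (6, 0x7), (0, 0x7)])),
   (6, ("srl",  [(3, 0x7), (6, 0x7), (0, 0x7)])),
   (7, ("addi", [(6, 0x7), (9, 0x7), (0, 0x3F)])),
   (8, ("lw",   [(6, 0x7), (9, 0x7), (0, 0x3F)])),
   (9, ("sw",   [(6, 0x7), (9, 0x7), (0, 0x3F)])),
   (10, ("beq", [(9, 0x7), (6, 0x7), (0, 0x3F)])),
   (11, ("bne", [(9, 0x7), (6, 0x7), (0, 0x3F)])),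
   (12, ("j",   [(0, 0xFFF)])),
   (13, ("jal", [(0, 0xFFF)])),
   (14, ("jr",  [(9, 0x7)]))]

def decode_instruction_alt (encoded : Int) : String × Option (List Int) :=
  match PySem.Dict.get? TABLE (PySem.Int.band (encoded >>> 12) 0xF) with
  | none => ("UNKNOWN", none)
  | some (op, fields) =>
      (op, some (fields.map (fun sm => PySem.Int.band (encoded >>> sm.1) sm.2)))

-- ===== PRECONDITION & SPEC =====
def Spec_decode_instruction (encoded : Int) (out : String × Option (List Int)) : Prop := out = decode_instruction_alt encoded
instance (encoded : Int) (out : String × Option (List Int)) : Decidable (Spec_decode_instruction encoded out) := by unfold Spec_decode_instruction; infer_instance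

-- ===== CLAIM (what is proved, stated in full; the proofs are below) =====
def Claim_equal_decode_instruction : Prop := ∀ (encoded : Int), Dom_decode_instruction encoded → Spec_decode_instruction encoded (decode_instruction encoded)

-- ===== LEMMAS AND PROOFS =====

lemma band_fifteen_bounds (x : Int) : 0 ≤ PySem.Int.band x 15 ∧ PySem.Int.band x 15 < 16 := by
  unfold PySem.Int.band
  have h15 : (15 : Int).toNat = 15 := rfl
  split_ifs with h1 h2 h2
  · rw [h15]
    have := Nat.and_le_right (n := x.toNat) (m := 15); omega
  · omega
  · rw [h15]; omega
  · omega

lemma decode_eq (encoded : Int) : decode_instruction encoded = decode_instruction_alt encoded := by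
  unfold decode_instruction decode_instruction_alt
  generalize hk : PySem.Int.band (encoded >>> 12) 0xF = k
  obtain ⟨h0, h1⟩ := hk ▸ band_fifteen_bounds (encoded >>> 12)
  have hz : ∀ y : Int, y >>> (0 : Int) = y := by
    intro y
    show y <<< (-(0 : Int)) = y
    rw [neg_zero, show ((0 : Int)) = ((0 : Nat) : Int) from rfl,
      Int.shiftLeft_natCast_right, Int.shiftLeft_zero]
  interval_cases k <;> simp [findOp, OPCODES, TABLE, PySem.Dict.get?] <;> rw [hz]

-- ===== VERDICT (by name: the statement is the Claim_ definition above) =====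
theorem decode_instruction_spec : Claim_equal_decode_instruction := by
  intro e _
  exact decode_eq e
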